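-- pv_equiv track=rewrite | github.com/fecgov/fecfile-image-generator | routes/src/f3x/helper.py | map_txn_img_num
-- ===== SOURCE A (Python) =====
-- import math
--
-- def map_txn_img_num(schedules, num, txn_img_json, image_num):
--     sch_count = memo_sch_count = 0
--
--     for schedule in schedules:
--         sch_count += 1
--
--         if schedule.get("transactionId"):
--             txn_img_json[schedule["transactionId"]] = image_num + 1
--
--         if schedule.get("memoDescription"):
--             memo_sch_count += 1
--
--         if sch_count == num:
--             image_num += 1
--             image_num += math.ceil(memo_sch_count / 2)
--
--             sch_count = 0
--             memo_sch_count = 0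
--
--     return txn_img_json
-- ===== SOURCE B (Python) =====
-- def map_txn_img_num(schedules, num, txn_img_json, image_num):
--     # Two-level pass over chunks of size num instead of flat running counters.
--     # Mutates txn_img_json in place, exactly as A does.
--     if num <= 0:
--         for schedule in schedules:
--             tid = schedule.get("transactionId")
--             if tid:
--                 txn_img_json[tid] = image_num + 1
--         return txn_img_json
--     for i in range(0, len(schedules), num):
--         chunk = schedules[i:i + num]
--         memo_count = 0
--         for schedule in chunk:
--             tid = schedule.get("transactionId")
--             if tid:
--                 txn_img_json[tid] = image_num + 1
--             if schedule.get("memoDescription"):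
--                 memo_count += 1
--         if len(chunk) == num:
--             image_num += 1 + (memo_count + 1) // 2
--     return txn_img_json
-- ===== Notes on version B (the rewrite author's own statement) =====
-- stated objective: alternative
-- what changed: Replaced A's single flat loop with running sch_count/memo_sch_count counters by a two-level pass: iterate over chunks of size num via slices, count memos per chunk, and advance image_num only when a chunk is full; num <= 0 becomes a plain assignment pass.
import Mathlib
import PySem

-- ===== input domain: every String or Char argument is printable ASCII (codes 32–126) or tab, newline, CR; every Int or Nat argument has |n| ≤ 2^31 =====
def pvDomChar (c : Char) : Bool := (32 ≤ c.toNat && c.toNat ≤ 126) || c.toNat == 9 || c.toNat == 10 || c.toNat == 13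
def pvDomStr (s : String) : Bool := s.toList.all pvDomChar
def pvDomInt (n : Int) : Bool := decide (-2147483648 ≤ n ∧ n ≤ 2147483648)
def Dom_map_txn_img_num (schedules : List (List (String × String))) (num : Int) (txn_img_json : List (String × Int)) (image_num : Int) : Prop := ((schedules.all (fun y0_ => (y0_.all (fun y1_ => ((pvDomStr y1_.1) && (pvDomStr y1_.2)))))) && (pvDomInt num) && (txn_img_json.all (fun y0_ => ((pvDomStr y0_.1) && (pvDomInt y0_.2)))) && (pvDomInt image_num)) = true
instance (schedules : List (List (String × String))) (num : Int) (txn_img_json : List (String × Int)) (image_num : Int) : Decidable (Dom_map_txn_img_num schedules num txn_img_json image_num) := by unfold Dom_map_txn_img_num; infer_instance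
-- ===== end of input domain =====

-- B restructures A's flat loop with running counters into a two-level pass over chunks of
-- size num (alternative decomposition, same O(n) cost); both Pythons mutate txn_img_json in
-- place the same way, and the equivalence proved is about the returned dict.

-- ===== PORT A =====

-- math.ceil(m / 2) on an int m: exact as -((-m) // 2) (the counts here are far below 2^53,
-- so Python's float division is exact for the ceil).
def pvCeilHalf (m : Int) : Int := -(PySem.Int.floordiv (-m) 2)

-- the flat loop of A: state (sch_count, memo_sch_count, txn_img_json, image_num)
def pvLoopA (num : Int) : List (List (String × String)) → Int → Int → PySem.Dict String Int → Int → PySem.Dict String Int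
  | [], _, _, txn, _ => txn
  | s :: rest, sc, mc, txn, img =>
    let sc' := sc + 1
    let txn' := match (PySem.Dict.mk s).get? "transactionId" with
      | some t => if t = "" then txn else txn.insert t (img + 1)
      | none => txn
    let mc' := match (PySem.Dict.mk s).get? "memoDescription" with
      | some m => if m = "" then mc else mc + 1
      | none => mc
    if sc' = num then pvLoopA num rest 0 0 txn' (img + 1 + pvCeilHalf mc')
    else pvLoopA num rest sc' mc' txn' img

def map_txn_img_num (schedules : List (List (String × String))) (num : Int) (txn_img_json : List (String × Int)) (image_num : Int) : List (String × Int) :=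
  (pvLoopA num schedules 0 0 (PySem.Dict.mk txn_img_json) image_num).items

-- ===== PORT B =====

-- body of B's num <= 0 loop: assign image_num+1 to a truthy transactionId
def pvAssignB (img : Int) (txn : PySem.Dict String Int) (s : List (String × String)) : PySem.Dict String Int :=
  match (PySem.Dict.mk s).get? "transactionId" with
  | some t => if t = "" then txn else txn.insert t (img + 1)
  | none => txn

-- body of B's inner chunk loop: assign, and count memoDescription entries
def pvChunkStep (img : Int) (acc : PySem.Dict String Int × Int) (s : List (String × String)) : PySem.Dict String Int × Int :=
  let txn' := match (PySem.Dict.mk s).get? "transactionId" with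
    | some t => if t = "" then acc.1 else acc.1.insert t (img + 1)
    | none => acc.1
  let mc' := match (PySem.Dict.mk s).get? "memoDescription" with
    | some m => if m = "" then acc.2 else acc.2 + 1
    | none => acc.2
  (txn', mc')

-- B's chunk loop (for i in range(0, len(schedules), num)), num = n ≥ 1; the n = 0 branch is
-- a totality guard only, B never calls it with n = 0
def pvLoopB : Nat → List (List (String × String)) → PySem.Dict String Int → Int → PySem.Dict String Int
  | _, [], txn, _ => txn
  | 0, _ :: _, txn, _ => txn
  | n + 1, s :: rest, txn, img =>
    let chunk := (s :: rest).take (n + 1)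
    let r := chunk.foldl (pvChunkStep img) (txn, 0)
    if chunk.length = n + 1 then
      pvLoopB (n + 1) ((s :: rest).drop (n + 1)) r.1 (img + 1 + PySem.Int.floordiv (r.2 + 1) 2)
    else r.1
  termination_by _ schedules => schedules.length
  decreasing_by simp only [List.length_drop, List.length_cons]; omega

def map_txn_img_num_alt (schedules : List (List (String × String))) (num : Int) (txn_img_json : List (String × Int)) (image_num : Int) : List (String × Int) :=
  if num ≤ 0 then
    (schedules.foldl (pvAssignB image_num) (PySem.Dict.mk txn_img_json)).items
  else
    (pvLoopB num.toNat schedules (PySem.Dict.mk txn_img_json) image_num).items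

-- ===== PRECONDITION & SPEC =====
def Spec_map_txn_img_num (schedules : List (List (String × String))) (num : Int) (txn_img_json : List (String × Int)) (image_num : Int) (out : List (String × Int)) : Prop := out = map_txn_img_num_alt schedules num txn_img_json image_num
instance (schedules : List (List (String × String))) (num : Int) (txn_img_json : List (String × Int)) (image_num : Int) (out : List (String × Int)) : Decidable (Spec_map_txn_img_num schedules num txn_img_json image_num out) := by unfold Spec_map_txn_img_num; infer_instance

-- ===== CLAIM (what is proved, stated in full; the proofs are below) =====
def Claim_equal_map_txn_img_num : Prop := ∀ (schedules : List (List (String × String))) (num : Int) (txn_img_json : List (String × Int)) (image_num : Int), Dom_map_txn_img_num schedules num txn_img_json image_num → Spec_map_txn_img_num schedules num txn_img_json image_num (map_txn_img_num schedules num txn_img_json image_num)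

-- ===== LEMMAS AND PROOFS =====

-- ceil(m/2) = floor((m+1)/2) on the integers
lemma pvCeilHalf_eq (m : Int) : pvCeilHalf m = PySem.Int.floordiv (m + 1) 2 := by
  unfold pvCeilHalf
  rw [PySem.Int.floordiv_eq_ediv_of_pos (by omega), PySem.Int.floordiv_eq_ediv_of_pos (by omega)]
  omega

-- with num ≤ 0 the batch never closes: A's loop is just B's assignment pass
lemma pvLoopA_nonpos (num : Int) (hnum : num ≤ 0) :
    ∀ (schedules : List (List (String × String))) (sc mc : Int) (txn : PySem.Dict String Int) (img : Int),
      0 ≤ sc → pvLoopA num schedules sc mc txn img = schedules.foldl (pvAssignB img) txn := by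
  intro schedules
  induction schedules with
  | nil => intro sc mc txn img _; rfl
  | cons s rest ih =>
    intro sc mc txn img hsc
    simp only [pvLoopA, List.foldl_cons]
    rw [if_neg (by omega)]
    rw [ih (sc + 1) _ _ img (by omega)]
    rfl

-- A over a chunk that exactly fills the batch = B's chunk fold, then close the batch
lemma pvLoopA_chunk_full (num : Int) :
    ∀ (chunk rest : List (List (String × String))) (sc mc : Int) (txn : PySem.Dict String Int) (img : Int),
      chunk ≠ [] → sc + chunk.length = num →
      pvLoopA num (chunk ++ rest) sc mc txn img =
        pvLoopA num rest 0 0 (chunk.foldl (pvChunkStep img) (txn, mc)).1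
          (img + 1 + pvCeilHalf (chunk.foldl (pvChunkStep img) (txn, mc)).2) := by
  intro chunk
  induction chunk with
  | nil => intro rest sc mc txn img h; exact absurd rfl h
  | cons s chunk' ih =>
    intro rest sc mc txn img _ hlen
    simp only [List.cons_append, pvLoopA, List.foldl_cons]
    rcases chunk' with _ | ⟨s', chunk''⟩
    · simp only [List.length_cons, List.length_nil] at hlen
      rw [if_pos (by omega)]
      rfl
    · rw [if_neg (by simp at hlen ⊢; omega)]
      rw [ih rest (sc + 1) _ _ img (by simp) (by simp at hlen ⊢; omega)]
      rfl

-- A over a trailing partial chunk = B's chunk fold, batch left open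
lemma pvLoopA_chunk_partial (num : Int) :
    ∀ (chunk : List (List (String × String))) (sc mc : Int) (txn : PySem.Dict String Int) (img : Int),
      sc + chunk.length < num →
      pvLoopA num chunk sc mc txn img = (chunk.foldl (pvChunkStep img) (txn, mc)).1 := by
  intro chunk
  induction chunk with
  | nil => intro sc mc txn img _; rfl
  | cons s chunk' ih =>
    intro sc mc txn img hlen
    simp only [pvLoopA, List.foldl_cons]
    rw [if_neg (by simp at hlen ⊢; omega)]
    rw [ih (sc + 1) _ _ img (by simp at hlen ⊢; omega)]
    rfl

-- main loop equivalence for num ≥ 1 (n = num.toNat, written n+1)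
lemma pvLoopA_eq_pvLoopB (n : Nat) :
    ∀ (schedules : List (List (String × String))) (txn : PySem.Dict String Int) (img : Int),
      pvLoopA ((n : Int) + 1) schedules 0 0 txn img = pvLoopB (n + 1) schedules txn img := by
  suffices h : ∀ (k : Nat) (schedules : List (List (String × String))), schedules.length ≤ k →
      ∀ (txn : PySem.Dict String Int) (img : Int),
      pvLoopA ((n : Int) + 1) schedules 0 0 txn img = pvLoopB (n + 1) schedules txn img by
    intro schedules txn img; exact h schedules.length schedules le_rfl txn img
  intro k
  induction k with
  | zero =>
    intro schedules hk txn img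
    rw [List.length_eq_zero_iff.mp (Nat.le_zero.mp hk)]
    simp only [pvLoopA, pvLoopB]
  | succ k ih =>
    intro schedules hk txn img
    rcases schedules with _ | ⟨s, rest⟩
    · simp only [pvLoopA, pvLoopB]
    · rw [pvLoopB]
      by_cases hlen : (s :: rest).length ≤ n
      · -- partial final chunk: take (n+1) = whole list, length ≠ n+1
        have htake : (s :: rest).take (n + 1) = s :: rest := List.take_of_length_le (by omega)
        rw [htake, if_neg (by omega)]
        have := pvLoopA_chunk_partial ((n : Int) + 1) (s :: rest) 0 0 txn img
          (by omega)
        simpa using this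
      · -- full chunk
        have hlt : n + 1 ≤ (s :: rest).length := by omega
        have htake : ((s :: rest).take (n + 1)).length = n + 1 := by
          rw [List.length_take]; omega
        rw [if_pos htake]
        have hsplit : s :: rest = (s :: rest).take (n + 1) ++ (s :: rest).drop (n + 1) :=
          (List.take_append_drop _ _).symm
        calc pvLoopA ((n : Int) + 1) (s :: rest) 0 0 txn img
            = pvLoopA ((n : Int) + 1) ((s :: rest).take (n + 1) ++ (s :: rest).drop (n + 1)) 0 0 txn img := by
              rw [← hsplit]
          _ = _ := by
              rw [pvLoopA_chunk_full ((n : Int) + 1) _ _ 0 0 txn img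
                (by intro h; rw [h] at htake; simp at htake)
                (by rw [htake]; push_cast; ring)]
              rw [pvCeilHalf_eq]
              exact ih _ (by
                simp only [List.length_drop, List.length_cons] at hk ⊢
                omega) _ _

theorem pv_main (schedules : List (List (String × String))) (num : Int) (txn_img_json : List (String × Int)) (image_num : Int) :
    map_txn_img_num schedules num txn_img_json image_num = map_txn_img_num_alt schedules num txn_img_json image_num := by
  unfold map_txn_img_num map_txn_img_num_alt
  by_cases h : num ≤ 0
  · rw [if_pos h, pvLoopA_nonpos num h schedules 0 0 _ image_num le_rfl]
  · rw [if_neg h]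
    obtain ⟨n, hn⟩ : ∃ n : Nat, num.toNat = n + 1 := ⟨num.toNat - 1, by omega⟩
    rw [hn]
    have hnum : num = (n : Int) + 1 := by omega
    rw [hnum, pvLoopA_eq_pvLoopB]

-- ===== VERDICT (by name: the statement is the Claim_ definition above) =====
theorem map_txn_img_num_spec : Claim_equal_map_txn_img_num := by
  intro schedules num txn_img_json image_num _
  unfold Spec_map_txn_img_num
  exact pv_main schedules num txn_img_json image_num
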